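-- pv_equiv track=rewrite | github.com/LeviWoodfall/Oak-AI | backend/agent/auto_learner.py | _determine_targets
-- ===== SOURCE A (Python) =====
-- def _determine_targets(pass_number: int, language: str,
--                       available_files: list[str]) -> list[str]:
--     """Determine which files to fetch based on pass, language, and available files."""
--     targets = []
--
--     # Normalize language for matching
--     lang_lower = language.lower() if language else ""
--
--     if pass_number == 1:
--         # Config files based on language
--         lang_configs = {
--             "python": ["requirements.txt", "pyproject.toml", "setup.py", "setup.cfg", "Pipfile", "poetry.lock", "environment.yml"],
--             "typescript": ["package.json", "tsconfig.json", "yarn.lock", "package-lock.json", "tsconfig.base.json"],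
--             "javascript": ["package.json", "yarn.lock", "package-lock.json"],
--             "rust": ["Cargo.toml", "Cargo.lock"],
--             "go": ["go.mod", "go.sum", "go.work"],
--             "java": ["pom.xml", "build.gradle", "build.gradle.kts", "gradle.properties"],
--             "c++": ["CMakeLists.txt", "Makefile", "configure.ac"],
--             "ruby": ["Gemfile", "Gemfile.lock", "Rakefile"],
--             "php": ["composer.json", "composer.lock"],
--         }
--
--         # Match language (case-insensitive, partial match)
--         for lang, configs in lang_configs.items():
--             if lang in lang_lower or lang_lower in lang:
--                 targets.extend(configs)
--                 break
--
--         # Common config files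
--         targets.extend(["LICENSE", "LICENSE.md", "CONTRIBUTING.md", "CODE_OF_CONDUCT.md", "SECURITY.md", ".gitignore", ".dockerignore", "Dockerfile", "docker-compose.yml"])
--
--     elif pass_number == 2:
--         # Source files - look for main entry points and core source files
--         source_patterns = {
--             "python": ["main.py", "app.py", "__init__.py", "src/__init__.py", "manage.py", "wsgi.py", "asgi.py"],
--             "typescript": ["index.ts", "main.ts", "src/index.ts", "src/main.ts", "app.ts", "server.ts"],
--             "javascript": ["index.js", "main.js", "src/index.js", "src/main.js", "app.js", "server.js"],
--             "rust": ["main.rs", "lib.rs", "src/main.rs", "src/lib.rs"],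
--             "go": ["main.go", "cmd/main.go", "server.go"],
--         }
--
--         for lang, patterns in source_patterns.items():
--             if lang in lang_lower or lang_lower in lang:
--                 targets.extend(patterns)
--                 break
--
--         # Also look for common source directories and all files in them
--         for f in available_files:
--             if f in ["src/", "lib/", "app/", "server/", "api/", "core/"]:
--                 targets.append(f)
--
--     elif pass_number == 3:
--         # Documentation and architecture
--         targets.extend(["README.md", "CHANGELOG.md", "ARCHITECTURE.md", "docs/README.md", "docs/ARCHITECTURE.md", "docs/API.md"])
--         for f in available_files:
--             if f.startswith("test_") or f.endswith(".test.ts") or f.endswith(".test.js") or f.endswith("_test.py"):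
--                 targets.append(f)
--             if f.startswith("tests/") or f.startswith("test/") or f.startswith("__tests__/"):
--                 targets.append(f)
--
--     elif pass_number == 4:
--         # Additional source files and utilities
--         for f in available_files:
--             # Add utility files
--             if "util" in f.lower() or "helper" in f.lower() or "utils" in f.lower():
--                 targets.append(f)
--             # Add config files
--             if f.endswith(".config.js") or f.endswith(".config.ts") or f.endswith(".rc"):
--                 targets.append(f)
--             # Add middleware files
--             if "middleware" in f.lower():
--                 targets.append(f)
--
--     elif pass_number == 5:
--         # Example files, templates, and additional docs
--         for f in available_files:
--             if f.startswith("example") or f.startswith("sample") or f.startswith("demo"):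
--                 targets.append(f)
--             if f.endswith(".example") or f.endswith(".template") or f.endswith(".sample"):
--                 targets.append(f)
--             if f.startswith("templates/") or f.startswith("template/"):
--                 targets.append(f)
--
--     # Filter to only files that actually exist
--     return [f for f in targets if f in available_files or any(f.startswith(av.rstrip("/")) for av in available_files)]
-- ===== SOURCE B (Python) =====
-- # B: same selection, restructured: the existence filter uses hash sets (exact names,
-- # and prefix matching by probing every prefix of the candidate against the set of
-- # rstripped available names) instead of rescanning available_files per candidate.
--
-- _LANG_CONFIGS = {
--     "python": ["requirements.txt", "pyproject.toml", "setup.py", "setup.cfg", "Pipfile", "poetry.lock", "environment.yml"],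
--     "typescript": ["package.json", "tsconfig.json", "yarn.lock", "package-lock.json", "tsconfig.base.json"],
--     "javascript": ["package.json", "yarn.lock", "package-lock.json"],
--     "rust": ["Cargo.toml", "Cargo.lock"],
--     "go": ["go.mod", "go.sum", "go.work"],
--     "java": ["pom.xml", "build.gradle", "build.gradle.kts", "gradle.properties"],
--     "c++": ["CMakeLists.txt", "Makefile", "configure.ac"],
--     "ruby": ["Gemfile", "Gemfile.lock", "Rakefile"],
--     "php": ["composer.json", "composer.lock"],
-- }
--
-- _SOURCE_PATTERNS = {
--     "python": ["main.py", "app.py", "__init__.py", "src/__init__.py", "manage.py", "wsgi.py", "asgi.py"],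
--     "typescript": ["index.ts", "main.ts", "src/index.ts", "src/main.ts", "app.ts", "server.ts"],
--     "javascript": ["index.js", "main.js", "src/index.js", "src/main.js", "app.js", "server.js"],
--     "rust": ["main.rs", "lib.rs", "src/main.rs", "src/lib.rs"],
--     "go": ["main.go", "cmd/main.go", "server.go"],
-- }
--
-- _COMMON_CONFIGS = ["LICENSE", "LICENSE.md", "CONTRIBUTING.md", "CODE_OF_CONDUCT.md", "SECURITY.md", ".gitignore", ".dockerignore", "Dockerfile", "docker-compose.yml"]
-- _DOCS = ["README.md", "CHANGELOG.md", "ARCHITECTURE.md", "docs/README.md", "docs/ARCHITECTURE.md", "docs/API.md"]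
-- _SRC_DIRS = {"src/", "lib/", "app/", "server/", "api/", "core/"}
--
--
-- def _pick(lang_lower, table):
--     return next((items for lang, items in table.items()
--                  if lang in lang_lower or lang_lower in lang), [])
--
--
-- def _test_hits(f):
--     out = []
--     if f.startswith("test_") or f.endswith(".test.ts") or f.endswith(".test.js") or f.endswith("_test.py"):
--         out.append(f)
--     if f.startswith("tests/") or f.startswith("test/") or f.startswith("__tests__/"):
--         out.append(f)
--     return out
--
--
-- def _util_hits(f):
--     out = []
--     fl = f.lower()
--     if "util" in fl or "helper" in fl or "utils" in fl:
--         out.append(f)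
--     if f.endswith(".config.js") or f.endswith(".config.ts") or f.endswith(".rc"):
--         out.append(f)
--     if "middleware" in fl:
--         out.append(f)
--     return out
--
--
-- def _example_hits(f):
--     out = []
--     if f.startswith("example") or f.startswith("sample") or f.startswith("demo"):
--         out.append(f)
--     if f.endswith(".example") or f.endswith(".template") or f.endswith(".sample"):
--         out.append(f)
--     if f.startswith("templates/") or f.startswith("template/"):
--         out.append(f)
--     return out
--
--
-- def _determine_targets(pass_number: int, language: str,
--                       available_files: list[str]) -> list[str]:
--     lang_lower = language.lower() if language else ""
--
--     if pass_number == 1: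
--         targets = _pick(lang_lower, _LANG_CONFIGS) + _COMMON_CONFIGS
--     elif pass_number == 2:
--         targets = _pick(lang_lower, _SOURCE_PATTERNS) + [f for f in available_files if f in _SRC_DIRS]
--     elif pass_number == 3:
--         targets = _DOCS + [x for f in available_files for x in _test_hits(f)]
--     elif pass_number == 4:
--         targets = [x for f in available_files for x in _util_hits(f)]
--     elif pass_number == 5:
--         targets = [x for f in available_files for x in _example_hits(f)]
--     else:
--         targets = []
--
--     exact = set(available_files)
--     prefixes = {av.rstrip("/") for av in available_files}
--     return [f for f in targets
--             if f in exact or any(f[:k] in prefixes for k in range(len(f) + 1))]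
-- ===== Notes on version B (the rewrite author's own statement) =====
-- stated objective: alternative
-- what changed: The final existence filter no longer scans available_files per candidate (exact equality plus startswith against every entry); B builds a set of the available names and a set of their rstrip('/') forms once and tests each candidate by a set lookup plus one lookup per prefix of the candidate, and the target-building loops become a first-match pick / filter / flatMap of per-file hit lists.
import Mathlib
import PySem

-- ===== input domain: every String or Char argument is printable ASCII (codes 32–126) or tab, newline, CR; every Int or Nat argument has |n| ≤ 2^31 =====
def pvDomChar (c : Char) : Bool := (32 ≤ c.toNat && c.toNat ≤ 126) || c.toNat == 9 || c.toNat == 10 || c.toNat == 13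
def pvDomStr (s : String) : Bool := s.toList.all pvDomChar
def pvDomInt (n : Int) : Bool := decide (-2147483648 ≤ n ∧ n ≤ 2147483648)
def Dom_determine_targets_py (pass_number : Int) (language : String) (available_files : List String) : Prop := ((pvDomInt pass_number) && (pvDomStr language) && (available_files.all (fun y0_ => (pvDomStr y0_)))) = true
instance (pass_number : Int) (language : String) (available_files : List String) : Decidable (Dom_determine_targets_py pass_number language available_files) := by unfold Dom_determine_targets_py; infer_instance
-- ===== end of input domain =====

-- B replaces A's per-candidate scan of available_files (exact + startswith test against every entry)
-- by set lookups: a set of the available names plus a set of their rstrip("/") forms probed with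
-- every prefix of the candidate; objective: alternative (same measured cost on random inputs).

-- shared module-level data of both programs
def pvLangConfigs : List (String × List String) :=
  [("python", ["requirements.txt", "pyproject.toml", "setup.py", "setup.cfg", "Pipfile", "poetry.lock", "environment.yml"]),
   ("typescript", ["package.json", "tsconfig.json", "yarn.lock", "package-lock.json", "tsconfig.base.json"]),
   ("javascript", ["package.json", "yarn.lock", "package-lock.json"]),
   ("rust", ["Cargo.toml", "Cargo.lock"]),
   ("go", ["go.mod", "go.sum", "go.work"]),
   ("java", ["pom.xml", "build.gradle", "build.gradle.kts", "gradle.properties"]),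
   ("c++", ["CMakeLists.txt", "Makefile", "configure.ac"]),
   ("ruby", ["Gemfile", "Gemfile.lock", "Rakefile"]),
   ("php", ["composer.json", "composer.lock"])]

def pvSourcePatterns : List (String × List String) :=
  [("python", ["main.py", "app.py", "__init__.py", "src/__init__.py", "manage.py", "wsgi.py", "asgi.py"]),
   ("typescript", ["index.ts", "main.ts", "src/index.ts", "src/main.ts", "app.ts", "server.ts"]),
   ("javascript", ["index.js", "main.js", "src/index.js", "src/main.js", "app.js", "server.js"]),
   ("rust", ["main.rs", "lib.rs", "src/main.rs", "src/lib.rs"]),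
   ("go", ["main.go", "cmd/main.go", "server.go"])]

def pvCommonConfigs : List String :=
  ["LICENSE", "LICENSE.md", "CONTRIBUTING.md", "CODE_OF_CONDUCT.md", "SECURITY.md", ".gitignore", ".dockerignore", "Dockerfile", "docker-compose.yml"]

def pvDocs : List String :=
  ["README.md", "CHANGELOG.md", "ARCHITECTURE.md", "docs/README.md", "docs/ARCHITECTURE.md", "docs/API.md"]

-- hand port of Python's str.rstrip("/") (not in PySem): drop trailing '/' characters; exact
def pyRstripSlash (s : String) : String :=
  String.ofList ((s.toList.reverse.dropWhile (fun c => c == '/')).reverse)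

-- ===== PORT A =====
-- A's "for lang, configs in table.items(): if lang in lang_lower or lang_lower in lang: targets.extend(configs); break"
def pvExtendFirstMatch (targets : List String) (lang_lower : String) : List (String × List String) → List String
  | [] => targets
  | (lang, configs) :: rest =>
      if PySem.Str.isIn lang lang_lower || PySem.Str.isIn lang_lower lang then targets ++ configs
      else pvExtendFirstMatch targets lang_lower rest

-- the targets list A has built when it reaches the final filter line
def pvTargetsA (pass_number : Int) (lang_lower : String) (available_files : List String) : List String :=
  if pass_number == 1 then
    pvExtendFirstMatch [] lang_lower pvLangConfigs ++ pvCommonConfigs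
  else if pass_number == 2 then
    available_files.foldl (fun acc f =>
      if ["src/", "lib/", "app/", "server/", "api/", "core/"].contains f then acc ++ [f] else acc)
      (pvExtendFirstMatch [] lang_lower pvSourcePatterns)
  else if pass_number == 3 then
    available_files.foldl (fun acc f =>
      let acc := if PySem.Str.startswith f "test_" || PySem.Str.endswith f ".test.ts" || PySem.Str.endswith f ".test.js" || PySem.Str.endswith f "_test.py" then acc ++ [f] else acc
      if PySem.Str.startswith f "tests/" || PySem.Str.startswith f "test/" || PySem.Str.startswith f "__tests__/" then acc ++ [f] else acc) pvDocs
  else if pass_number == 4 then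
    available_files.foldl (fun acc f =>
      let acc := if PySem.Str.isIn "util" (PySem.Str.lower f) || PySem.Str.isIn "helper" (PySem.Str.lower f) || PySem.Str.isIn "utils" (PySem.Str.lower f) then acc ++ [f] else acc
      let acc := if PySem.Str.endswith f ".config.js" || PySem.Str.endswith f ".config.ts" || PySem.Str.endswith f ".rc" then acc ++ [f] else acc
      if PySem.Str.isIn "middleware" (PySem.Str.lower f) then acc ++ [f] else acc) []
  else if pass_number == 5 then
    available_files.foldl (fun acc f =>
      let acc := if PySem.Str.startswith f "example" || PySem.Str.startswith f "sample" || PySem.Str.startswith f "demo" then acc ++ [f] else acc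
      let acc := if PySem.Str.endswith f ".example" || PySem.Str.endswith f ".template" || PySem.Str.endswith f ".sample" then acc ++ [f] else acc
      if PySem.Str.startswith f "templates/" || PySem.Str.startswith f "template/" then acc ++ [f] else acc) []
  else []

def determine_targets_py (pass_number : Int) (language : String) (available_files : List String) : List String :=
  let lang_lower := if language ≠ "" then PySem.Str.lower language else ""
  (pvTargetsA pass_number lang_lower available_files).filter (fun f =>
    available_files.contains f ||
    available_files.any (fun av => PySem.Str.startswith f (pyRstripSlash av)))

-- ===== PORT B =====
def pvPick (lang_lower : String) : List (String × List String) → List String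
  | [] => []
  | (lang, items) :: rest =>
      if PySem.Str.isIn lang lang_lower || PySem.Str.isIn lang_lower lang then items
      else pvPick lang_lower rest

def pvTestHits (f : String) : List String :=
  (if PySem.Str.startswith f "test_" || PySem.Str.endswith f ".test.ts" || PySem.Str.endswith f ".test.js" || PySem.Str.endswith f "_test.py" then [f] else []) ++
  (if PySem.Str.startswith f "tests/" || PySem.Str.startswith f "test/" || PySem.Str.startswith f "__tests__/" then [f] else [])

def pvUtilHits (f : String) : List String :=
  let fl := PySem.Str.lower f
  (if PySem.Str.isIn "util" fl || PySem.Str.isIn "helper" fl || PySem.Str.isIn "utils" fl then [f] else []) ++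
  (if PySem.Str.endswith f ".config.js" || PySem.Str.endswith f ".config.ts" || PySem.Str.endswith f ".rc" then [f] else []) ++
  (if PySem.Str.isIn "middleware" fl then [f] else [])

def pvExampleHits (f : String) : List String :=
  (if PySem.Str.startswith f "example" || PySem.Str.startswith f "sample" || PySem.Str.startswith f "demo" then [f] else []) ++
  (if PySem.Str.endswith f ".example" || PySem.Str.endswith f ".template" || PySem.Str.endswith f ".sample" then [f] else []) ++
  (if PySem.Str.startswith f "templates/" || PySem.Str.startswith f "template/" then [f] else [])

def pvTargetsB (pass_number : Int) (lang_lower : String) (available_files : List String) : List String :=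
  if pass_number == 1 then
    pvPick lang_lower pvLangConfigs ++ pvCommonConfigs
  else if pass_number == 2 then
    pvPick lang_lower pvSourcePatterns ++
      available_files.filter (fun f => PySem.Set.contains (PySem.Set.ofList ["src/", "lib/", "app/", "server/", "api/", "core/"]) f)
  else if pass_number == 3 then
    pvDocs ++ available_files.flatMap pvTestHits
  else if pass_number == 4 then
    available_files.flatMap pvUtilHits
  else if pass_number == 5 then
    available_files.flatMap pvExampleHits
  else []

def determine_targets_py_alt (pass_number : Int) (language : String) (available_files : List String) : List String :=
  let lang_lower := if language ≠ "" then PySem.Str.lower language else ""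
  let exact : PySem.Set String := PySem.Set.ofList available_files
  let prefixes : PySem.Set String := PySem.Set.ofList (available_files.map pyRstripSlash)
  (pvTargetsB pass_number lang_lower available_files).filter (fun f =>
    PySem.Set.contains exact f ||
    (PySem.List.pyRange 0 (PySem.Str.len f + 1) 1).any
      (fun k => PySem.Set.contains prefixes (PySem.Str.slice f none (some k))))

-- ===== PRECONDITION & SPEC =====
def Spec_determine_targets_py (pass_number : Int) (language : String) (available_files : List String) (out : List String) : Prop := out = determine_targets_py_alt pass_number language available_files
instance (pass_number : Int) (language : String) (available_files : List String) (out : List String) : Decidable (Spec_determine_targets_py pass_number language available_files out) := by unfold Spec_determine_targets_py; infer_instance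

-- ===== CLAIM (what is proved, stated in full; the proofs are below) =====
def Claim_equal_determine_targets_py : Prop := ∀ (pass_number : Int) (language : String) (available_files : List String), Dom_determine_targets_py pass_number language available_files → Spec_determine_targets_py pass_number language available_files (determine_targets_py pass_number language available_files)

-- ===== LEMMAS AND PROOFS =====

-- A's extend-and-break loop equals B's first-match pick
lemma extendFirstMatch_eq_pick (targets : List String) (ll : String) (table : List (String × List String)) :
    pvExtendFirstMatch targets ll table = targets ++ pvPick ll table := by
  induction table with
  | nil => simp [pvExtendFirstMatch, pvPick]
  | cons p rest ih =>
      obtain ⟨lang, items⟩ := p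
      simp only [pvExtendFirstMatch, pvPick]
      split_ifs <;> simp [ih]

-- membership in a set built from a list is membership in the list
lemma set_contains_ofList (xs : List String) (x : String) :
    PySem.Set.contains (PySem.Set.ofList xs) x = xs.contains x := by
  simp [PySem.Set.contains_eq_listContains, PySem.Set.mem_ofList]

-- A's two/three-if append loops are B's flatMap of conditional singletons
lemma foldl_two_if_eq_flatMap (p q : String → Bool) (l : List String) (init : List String) :
    l.foldl (fun acc f =>
      let acc := if p f then acc ++ [f] else acc
      if q f then acc ++ [f] else acc) init
    = init ++ l.flatMap (fun f => (if p f then [f] else []) ++ (if q f then [f] else [])) := by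
  have h : (fun (acc : List String) f =>
      let acc := if p f then acc ++ [f] else acc
      if q f then acc ++ [f] else acc)
      = fun acc f => acc ++ ((if p f then [f] else []) ++ (if q f then [f] else [])) := by
    funext acc f; by_cases hp : p f <;> by_cases hq : q f <;> simp [hp, hq]
  rw [h, PySem.List.foldl_append_eq_flatMap]

lemma foldl_three_if_eq_flatMap (p q r : String → Bool) (l : List String) (init : List String) :
    l.foldl (fun acc f =>
      let acc := if p f then acc ++ [f] else acc
      let acc := if q f then acc ++ [f] else acc
      if r f then acc ++ [f] else acc) init
    = init ++ l.flatMap (fun f => (if p f then [f] else []) ++ (if q f then [f] else []) ++ (if r f then [f] else [])) := by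
  have h : (fun (acc : List String) f =>
      let acc := if p f then acc ++ [f] else acc
      let acc := if q f then acc ++ [f] else acc
      if r f then acc ++ [f] else acc)
      = fun acc f => acc ++ ((if p f then [f] else []) ++ (if q f then [f] else []) ++ (if r f then [f] else [])) := by
    funext acc f; by_cases hp : p f <;> by_cases hq : q f <;> by_cases hr : r f <;> simp [hp, hq, hr]
  rw [h, PySem.List.foldl_append_eq_flatMap]

-- both ports build the same targets list
lemma targets_eq (pass_number : Int) (ll : String) (available_files : List String) :
    pvTargetsA pass_number ll available_files = pvTargetsB pass_number ll available_files := by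
  unfold pvTargetsA pvTargetsB
  split_ifs
  · rw [extendFirstMatch_eq_pick]; simp
  · rw [extendFirstMatch_eq_pick, List.nil_append]
    have h := PySem.List.foldl_append_if
      (fun f => (["src/", "lib/", "app/", "server/", "api/", "core/"] : List String).contains f)
      (id : String → String) available_files (pvPick ll pvSourcePatterns)
    simp only [id_eq] at h
    rw [h, List.map_id]
    congr 1
  · rw [foldl_two_if_eq_flatMap]
    congr 1
  · rw [foldl_three_if_eq_flatMap, List.nil_append]
    congr 1
  · rw [foldl_three_if_eq_flatMap, List.nil_append]
    congr 1
  · rfl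

-- the filter predicates agree: scanning available_files for an exact or startswith hit
-- equals set membership plus probing every prefix of f against the set of rstripped names
lemma filter_pred_eq (f : String) (avs : List String) :
    (avs.contains f || avs.any (fun av => PySem.Str.startswith f (pyRstripSlash av)))
    = (PySem.Set.contains (PySem.Set.ofList avs) f ||
       (PySem.List.pyRange 0 (PySem.Str.len f + 1) 1).any
         (fun k => PySem.Set.contains (PySem.Set.ofList (avs.map pyRstripSlash)) (PySem.Str.slice f none (some k)))) := by
  rw [set_contains_ofList]
  congr 1
  rw [Bool.eq_iff_iff]
  simp only [List.any_eq_true, set_contains_ofList, List.contains_iff_mem,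
    List.mem_map, PySem.List.mem_pyRange_one]
  constructor
  · rintro ⟨av, hav, hsw⟩
    have hpre : (pyRstripSlash av).toList <+: f.toList := by
      have h := PySem.Str.startswith_eq f (pyRstripSlash av)
      rw [h] at hsw
      exact (PySem.Chars.startswith_iff _ _).mp hsw
    refine ⟨((pyRstripSlash av).toList.length : Int), ⟨Int.natCast_nonneg _, ?_⟩, av, hav, ?_⟩
    · have hlen : (pyRstripSlash av).toList.length ≤ f.toList.length := hpre.length_le
      have hf : PySem.Str.len f = (f.toList.length : Int) := PySem.Str.len_eq f
      omega
    · apply String.toList_inj.mp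
      rw [PySem.Str.toList_slice, PySem.Chars.slice_eq_listSlice,
        PySem.List.slice_to _ (Int.natCast_nonneg _)]
      rw [Int.toNat_natCast]
      exact List.prefix_iff_eq_take.mp hpre
  · rintro ⟨k, ⟨hk0, _⟩, av, hav, heq⟩
    refine ⟨av, hav, ?_⟩
    rw [PySem.Str.startswith_eq, PySem.Chars.startswith_iff]
    have h3 : (pyRstripSlash av).toList = f.toList.take k.toNat := by
      rw [heq, PySem.Str.toList_slice, PySem.Chars.slice_eq_listSlice,
        PySem.List.slice_to _ hk0]
    rw [h3]
    exact List.take_prefix _ _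

theorem determine_targets_py_equal (pass_number : Int) (language : String) (available_files : List String) :
    determine_targets_py pass_number language available_files
    = determine_targets_py_alt pass_number language available_files := by
  unfold determine_targets_py determine_targets_py_alt
  simp only []
  rw [targets_eq]
  apply List.filter_congr
  intro f _
  exact filter_pred_eq f available_files

-- ===== VERDICT (by name: the statement is the Claim_ definition above) =====
theorem determine_targets_py_spec : Claim_equal_determine_targets_py := by
  intro pass_number language available_files _
  unfold Spec_determine_targets_py
  exact determine_targets_py_equal pass_number language available_files
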